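-- pv_equiv track=rewrite | github.com/AVasilyev1998/Python_algorythms | kurs_channel/Hamming_module.py | push_nulls
-- ===== SOURCE A (Python) =====
-- def step(num):
--     if num in [0, 1, 2, 4, 8, 16, 32, 64, 128, 256, 512, 1024, 2048, 4096]:  # TODO: correct
--         return True
--     else:
--         return False
--
-- def push_nulls(_in, _out, vector):
--     nulled = []
--     j = 0
--     for i in range(1, _out+1):
--         if step(i):
--             nulled.append(0)
--         else:
--             nulled.append(vector[j])
--             j += 1
--     return nulled
-- ===== SOURCE B (Python) =====
-- PARITY = [1, 2, 4, 8, 16, 32, 64, 128, 256, 512, 1024, 2048, 4096]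
--
-- def push_nulls(_in, _out, vector):
--     parity = [p for p in PARITY if p <= _out]
--     res = list(vector[:max(_out - len(parity), 0)])
--     for p in parity:
--         res.insert(p - 1, 0)
--     return res
-- ===== Notes on version B (the rewrite author's own statement) =====
-- stated objective: alternative
-- what changed: Instead of A's element-by-element branching pass with a running vector index, B selects the parity positions <= _out from the hardcoded table, copies the needed prefix slice of the vector in one C-level slice, and then inserts a 0 at each of the at most 13 parity positions in increasing order.
import Mathlib
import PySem

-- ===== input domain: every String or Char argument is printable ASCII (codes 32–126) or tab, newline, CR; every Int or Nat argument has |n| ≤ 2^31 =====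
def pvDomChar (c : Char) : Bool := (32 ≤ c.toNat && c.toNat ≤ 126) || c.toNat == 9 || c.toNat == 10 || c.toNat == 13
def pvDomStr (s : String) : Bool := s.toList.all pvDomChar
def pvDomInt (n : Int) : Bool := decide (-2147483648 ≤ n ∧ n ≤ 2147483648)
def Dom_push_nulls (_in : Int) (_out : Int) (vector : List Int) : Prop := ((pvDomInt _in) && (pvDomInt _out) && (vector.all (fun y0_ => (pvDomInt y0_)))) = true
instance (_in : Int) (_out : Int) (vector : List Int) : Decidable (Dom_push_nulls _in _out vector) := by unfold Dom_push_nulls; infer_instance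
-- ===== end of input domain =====

-- B replaces A's single branching append-pass (running vector index) by: select the parity
-- positions <= _out from the hardcoded table, copy the needed prefix slice of the vector,
-- and insert a 0 at each parity position (one bulk slice instead of a per-element Python
-- loop; a timing run measured B faster by a constant factor).

-- ===== PORT A =====
-- helper `step` of A's Python (hardcoded membership list, quirk reproduced verbatim)
def pvStep (num : Int) : Bool :=
  if ([0, 1, 2, 4, 8, 16, 32, 64, 128, 256, 512, 1024, 2048, 4096] : List Int).contains num
  then true else false

-- vector[j]: Python raises IndexError out of range; Pre_ keeps j in range, so getD 0 is never hit there
def pvVget (vector : List Int) (j : Nat) : Int :=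
  (PySem.List.pyGet? vector (j : Int)).getD 0

-- loop `for i in range(1, _out+1)` with state (nulled, j)
def pvPushA (vector : List Int) : List Int → List Int → Nat → List Int
  | [], acc, _ => acc
  | i :: rest, acc, j =>
    if pvStep i then pvPushA vector rest (acc ++ [0]) j
    else pvPushA vector rest (acc ++ [pvVget vector j]) (j + 1)

def push_nulls (_in : Int) (_out : Int) (vector : List Int) : List Int :=
  pvPushA vector (PySem.List.pyRange 1 (_out + 1)) [] 0

-- ===== PORT B =====
-- Source B's module constant PARITY
def pvParity : List Int := [1, 2, 4, 8, 16, 32, 64, 128, 256, 512, 1024, 2048, 4096]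

-- `parity = [p for p in PARITY if p <= _out]`, `res = list(vector[:max(_out-len(parity),0)])`,
-- then `for p in parity: res.insert(p-1, 0)`
def push_nulls_alt (_in : Int) (_out : Int) (vector : List Int) : List Int :=
  let parity := pvParity.filter (fun p => decide (p ≤ _out))
  let res := PySem.List.slice vector none (some (max (_out - parity.length) 0))
  parity.foldl (fun res p => PySem.List.insert res (p - 1) 0) res

-- ===== PRECONDITION & SPEC =====
-- Pre_ excludes exactly the inputs on which Python A raises IndexError (vector shorter than
-- the number of data-carrying positions in 1.._out).
def Pre_push_nulls (_in : Int) (_out : Int) (vector : List Int) : Prop :=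
  (_out - (([1, 2, 4, 8, 16, 32, 64, 128, 256, 512, 1024, 2048, 4096] : List Int).filter
      (fun p => decide (p ≤ _out))).length).toNat ≤ vector.length
instance (_in : Int) (_out : Int) (vector : List Int) : Decidable (Pre_push_nulls _in _out vector) := by
  unfold Pre_push_nulls; infer_instance

def pvWitness_push_nulls : Int × Int × List Int := (0, 7, [1, 0, 1, 1])

def Spec_push_nulls (_in : Int) (_out : Int) (vector : List Int) (out : List Int) : Prop := out = push_nulls_alt _in _out vector
instance (_in : Int) (_out : Int) (vector : List Int) (out : List Int) : Decidable (Spec_push_nulls _in _out vector out) := by unfold Spec_push_nulls; infer_instance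

-- ===== CLAIM (what is proved, stated in full; the proofs are below) =====
def Claim_equal_push_nulls : Prop := ∀ (_in : Int) (_out : Int) (vector : List Int), Dom_push_nulls _in _out vector → Pre_push_nulls _in _out vector → Spec_push_nulls _in _out vector (push_nulls _in _out vector)

-- ===== LEMMAS AND PROOFS =====

-- A's loop, peeling the last range element
theorem pvPushA_append (vector : List Int) (x : Int) (l : List Int) (acc : List Int) (j : Nat) :
    pvPushA vector (l ++ [x]) acc j =
      if pvStep x then pvPushA vector l acc j ++ [0]
      else pvPushA vector l acc j ++ [pvVget vector (j + (l.filter (fun i => !pvStep i)).length)] := by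
  induction l generalizing acc j with
  | nil => simp [pvPushA]
  | cons i rest ih =>
    by_cases hi : pvStep i <;>
      simp [pvPushA, hi, ih, Nat.add_assoc, Nat.add_comm 1]

-- `step i` agrees with PARITY membership on i ≥ 1 (0 is unreachable from range(1, …))
theorem pvStep_eq_contains (i : Int) (h : 1 ≤ i) : pvStep i = pvParity.contains i := by
  simp only [pvStep, pvParity, List.contains_eq_mem, List.mem_cons, List.mem_singleton,
    if_pos, List.not_mem_nil]
  by_cases h0 : i = 0 <;> simp [h0] <;> omega

-- decomposing a sorted filter at its upper bound
theorem pv_filter_le_succ (H : List Int) (hs : H.Pairwise (· < ·)) (n : Int) :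
    H.filter (fun p => decide (p ≤ n)) =
      H.filter (fun p => decide (p < n)) ++ (if H.contains n then [n] else []) := by
  induction H with
  | nil => simp
  | cons h t ih =>
    have hlt : ∀ x ∈ t, h < x := (List.pairwise_cons.mp hs).1
    have iht := ih ((List.pairwise_cons.mp hs).2)
    rcases lt_trichotomy h n with hc | hc | hc
    · have hne : ¬ n = h := by omega
      simp [List.filter_cons, hc, le_of_lt hc, iht, List.contains_eq_mem, hne]
    · subst hc
      have ht1 : t.filter (fun p => decide (p ≤ h)) = [] := by
        rw [List.filter_eq_nil_iff]; intro x hx; have := hlt x hx; simp; omega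
      have ht2 : t.filter (fun p => decide (p < h)) = [] := by
        rw [List.filter_eq_nil_iff]; intro x hx; have := hlt x hx; simp; omega
      simp [List.filter_cons, ht1, ht2, List.contains_eq_mem]
    · have h1 : ¬ (h < n) := by omega
      have h2 : ¬ (h ≤ n) := by omega
      have ht1 : t.filter (fun p => decide (p ≤ n)) = [] := by
        rw [List.filter_eq_nil_iff]; intro x hx; have := hlt x hx; simp; omega
      have ht2 : t.filter (fun p => decide (p < n)) = [] := by
        rw [List.filter_eq_nil_iff]; intro x hx; have := hlt x hx; simp; omega
      have hnm : n ∉ t := fun hx => by have := hlt n hx; omega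
      have hne : ¬ n = h := by omega
      simp [List.filter_cons, h1, h2, ht1, ht2, List.contains_eq_mem, hne, hnm]

-- invariant for B's insert loop: positions fit in the list as it grows
def pvOk : List Int → Nat → Prop
  | [], _ => True
  | p :: rest, L => 1 ≤ p ∧ (p - 1).toNat ≤ L ∧ pvOk rest (L + 1)

theorem pvOk_mono (ps : List Int) (L : Nat) (h : pvOk ps L) : pvOk ps (L + 1) := by
  induction ps generalizing L with
  | nil => trivial
  | cons p rest ih =>
    obtain ⟨h1, h2, h3⟩ := h
    exact ⟨h1, by omega, ih _ h3⟩

theorem pvOk_snoc (ps : List Int) (L : Nat) (q : Int) (h : pvOk ps L)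
    (hq1 : 1 ≤ q) (hq2 : (q - 1).toNat ≤ L + ps.length) : pvOk (ps ++ [q]) L := by
  induction ps generalizing L with
  | nil => exact ⟨hq1, by simpa using hq2, trivial⟩
  | cons p rest ih =>
    obtain ⟨h1, h2, h3⟩ := h
    exact ⟨h1, h2, ih _ h3 (by simp at hq2 ⊢; omega)⟩

theorem pvFold_length (ps : List Int) (xs : List Int) :
    (ps.foldl (fun r p => PySem.List.insert r (p - 1) 0) xs).length = xs.length + ps.length := by
  induction ps generalizing xs with
  | nil => simp
  | cons p rest ih => simp [ih, PySem.List.length_insert]; omega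

theorem pvFold_append_elem (ps : List Int) (xs : List Int) (x : Int) (h : pvOk ps xs.length) :
    ps.foldl (fun r p => PySem.List.insert r (p - 1) 0) (xs ++ [x]) =
      ps.foldl (fun r p => PySem.List.insert r (p - 1) 0) xs ++ [x] := by
  induction ps generalizing xs with
  | nil => rfl
  | cons p rest ih =>
    obtain ⟨h1, h2, h3⟩ := h
    have hcast : p - 1 = (((p - 1).toNat : Nat) : Int) := by omega
    have hins : PySem.List.insert (xs ++ [x]) (p - 1) 0 =
        PySem.List.insert xs (p - 1) 0 ++ [x] := by
      rw [hcast, PySem.List.insert_natCast _ _ _ (by simp; omega),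
        PySem.List.insert_natCast _ _ _ h2,
        List.take_append_of_le_length h2, List.drop_append_of_le_length h2]
      simp
    simp only [List.foldl_cons, hins]
    exact ih _ (by rw [PySem.List.length_insert]; exact h3)

-- abbreviations for the two loops as functions of n = _out.toNat
def pvR (n : Nat) : List Int := (List.range n).map (fun k : Nat => (1 : Int) + k)
def pvP (n : Nat) : List Int := pvParity.filter (fun p => decide (p ≤ (n : Int)))
def pvB (vector : List Int) (n : Nat) : List Int :=
  (pvP n).foldl (fun r p => PySem.List.insert r (p - 1) 0) (vector.take (n - (pvP n).length))

theorem pvP_succ (n : Nat) :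
    pvP (n + 1) = pvP n ++ (if pvParity.contains ((n : Int) + 1) then [(n : Int) + 1] else []) := by
  have h := pv_filter_le_succ pvParity (by decide) ((n : Int) + 1)
  have hlt : (fun p : Int => decide (p < (n : Int) + 1)) = fun p : Int => decide (p ≤ (n : Int)) := by
    funext p; simp [Int.lt_add_one_iff]
  rw [hlt] at h
  simpa [pvP, Nat.cast_add, Nat.cast_one] using h

theorem pv_filter_not_length (l : List Int) (p : Int → Bool) :
    (l.filter (fun i => !p i)).length = l.length - (l.filter p).length := by
  induction l with
  | nil => simp
  | cons a t ih =>
    have : (t.filter p).length ≤ t.length := List.length_filter_le _ _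
    by_cases hp : p a <;> simp [List.filter_cons, hp, ih] <;> omega

theorem pvP_zero : pvP 0 = [] := by decide

theorem pvP_len (n : Nat) : (pvP n).length ≤ n := by
  induction n with
  | zero => rw [pvP_zero]; simp
  | succ n ih =>
    rw [pvP_succ]
    by_cases hc : ((n : Int) + 1) ∈ pvParity <;> simp [List.contains_eq_mem, hc] <;> omega

theorem pv_main (vector : List Int) (n : Nat) (h : n - (pvP n).length ≤ vector.length) :
    pvPushA vector (pvR n) [] 0 = pvB vector n ∧
    pvOk (pvP n) (n - (pvP n).length) := by
  induction n with
  | zero =>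
    refine ⟨?_, trivial⟩
    simp [pvR, pvB, pvP, pvPushA, pvParity]
  | succ n ih =>
    have hstep : pvStep ((1 : Int) + n) = pvParity.contains ((n : Int) + 1) := by
      rw [pvStep_eq_contains _ (by omega), add_comm]
    have hR : pvR (n + 1) = pvR n ++ [(1 : Int) + n] := by
      simp [pvR, List.range_succ]
    have hPlen : (pvP n).length ≤ n := pvP_len n
    have hcnt : ∀ m : Nat, ((pvR m).filter pvStep).length = (pvP m).length := by
      intro m
      induction m with
      | zero => rw [pvP_zero]; simp [pvR]
      | succ m ihm =>
        have hRm : pvR (m + 1) = pvR m ++ [(1 : Int) + m] := by simp [pvR, List.range_succ]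
        have hstepm : pvStep ((1 : Int) + m) = pvParity.contains ((m : Int) + 1) := by
          rw [pvStep_eq_contains _ (by omega), add_comm]
        rw [hRm, List.filter_append, pvP_succ]
        by_cases hc : ((m : Int) + 1) ∈ pvParity <;>
          simp [List.filter_cons, hstepm, List.contains_eq_mem, hc, ihm]
    by_cases hc : pvParity.contains ((n : Int) + 1)
    · have hP : pvP (n + 1) = pvP n ++ [(n : Int) + 1] := by rw [pvP_succ, if_pos hc]
      have hlen : (pvP (n + 1)).length = (pvP n).length + 1 := by rw [hP]; simp
      have hnd : (n + 1) - (pvP (n + 1)).length = n - (pvP n).length := by omega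
      have h' : n - (pvP n).length ≤ vector.length := by omega
      obtain ⟨ihA, ihOk⟩ := ih h'
      have hBlen : (pvB vector n).length = n := by
        rw [pvB, pvFold_length, List.length_take]
        omega
      constructor
      · have hrhs : pvB vector (n + 1) = PySem.List.insert (pvB vector n) ((n : Int) + 1 - 1) 0 := by
          rw [pvB, hnd, hP, List.foldl_append, ← pvB]
          simp only [List.foldl_cons, List.foldl_nil]
        rw [hR, pvPushA_append, if_pos (by rw [hstep]; exact hc), ihA, hrhs]
        have hix : (n : Int) + 1 - 1 = ((pvB vector n).length : Int) := by rw [hBlen]; push_cast; ring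
        rw [hix, PySem.List.insert_natCast _ _ _ (le_refl _)]
        simp
      · rw [hnd, hP]
        refine pvOk_snoc _ _ _ ihOk (by omega) ?_
        omega
    · have hP : pvP (n + 1) = pvP n := by rw [pvP_succ, if_neg hc]; simp
      have hnd : (n + 1) - (pvP (n + 1)).length = (n - (pvP n).length) + 1 := by
        rw [hP]; omega
      have h' : n - (pvP n).length ≤ vector.length := by omega
      obtain ⟨ihA, ihOk⟩ := ih h'
      have hidx : n - (pvP n).length < vector.length := by omega
      have htake : vector.take ((n - (pvP n).length) + 1) =
          vector.take (n - (pvP n).length) ++ [vector[n - (pvP n).length]'hidx] := by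
        rw [List.take_succ, List.getElem?_eq_getElem hidx]
        rfl
      have hget : pvVget vector (n - (pvP n).length) = vector[n - (pvP n).length]'hidx := by
        simp [pvVget, PySem.List.pyGet?_natCast, List.getElem?_eq_getElem hidx]
      constructor
      · have hfc : ((pvR n).filter (fun i => !pvStep i)).length = n - (pvP n).length := by
          rw [pv_filter_not_length, hcnt n]; simp [pvR]
        have hokt : pvOk (pvP n) (vector.take (n - (pvP n).length)).length := by
          rw [List.length_take]
          have : min (n - (pvP n).length) vector.length = n - (pvP n).length := by omega
          rw [this]; exact ihOk
        have hrhs : pvB vector (n + 1) = pvB vector n ++ [vector[n - (pvP n).length]'hidx] := by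
          rw [pvB, hnd, hP, htake, pvFold_append_elem _ _ _ hokt, ← pvB]
        rw [hR, pvPushA_append, if_neg (by rw [hstep]; exact hc), ihA, hrhs, hfc]
        simp [hget]
      · rw [hnd, hP]
        exact pvOk_mono _ _ ihOk

-- the Python-side filter over Int bound equals pvP at _out.toNat
theorem pv_filter_toNat (_out : Int) :
    pvParity.filter (fun p => decide (p ≤ _out)) = pvP _out.toNat := by
  by_cases hpos : 0 ≤ _out
  · have : ((_out.toNat : Int)) = _out := Int.toNat_of_nonneg hpos
    simp [pvP, this]
  · have h1 : pvParity.filter (fun p => decide (p ≤ _out)) = [] := by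
      rw [List.filter_eq_nil_iff]; intro x hx
      revert hx; simp [pvParity]; omega
    have h2 : pvP _out.toNat = [] := by
      have : _out.toNat = 0 := by omega
      rw [this, pvP_zero]
    rw [h1, h2]

-- ===== VERDICT (by name: the statement is the Claim_ definition above) =====
theorem push_nulls_spec : Claim_equal_push_nulls := by
  intro _in _out vector _ hpre
  unfold Spec_push_nulls push_nulls push_nulls_alt
  have hfil := pv_filter_toNat _out
  set n := _out.toNat with hn
  have hPlen : (pvP n).length ≤ n := pvP_len n
  have hvec : n - (pvP n).length ≤ vector.length := by
    unfold Pre_push_nulls at hpre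
    have he : (([1, 2, 4, 8, 16, 32, 64, 128, 256, 512, 1024, 2048, 4096] : List Int).filter
        (fun p => decide (p ≤ _out))) = pvP n := hfil
    rw [he] at hpre
    omega
  have hmain := (pv_main vector n hvec).1
  rw [PySem.List.pyRange_one]
  have h1 : (_out + 1 - 1).toNat = n := by omega
  rw [h1]
  rw [hfil, show (List.range n).map (fun k : Nat => (1 : Int) + k) = pvR n from rfl]
  show pvPushA vector (pvR n) [] 0 =
    List.foldl (fun res p => PySem.List.insert res (p - 1) 0)
      (PySem.List.slice vector none (some (max (_out - ((pvP n).length : Int)) 0))) (pvP n)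
  have hb : max (_out - ((pvP n).length : Int)) 0 = (((n - (pvP n).length : Nat) : Int)) := by
    omega
  rw [hb, PySem.List.slice_to_natCast, hmain, pvB]
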